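-- pv_equiv track=rewrite | github.com/weldoy/EGE-solving | OPENFIPI/8.py | f
-- ===== SOURCE A (Python) =====
-- def f(x: str):
--     evens = '02468'
--     odds = '13579'
--     for i in range(len(x) - 1):
--         if x[i] in evens and x[i+1] in evens:
--             return False
--         if x[i] in odds and x[i+1] in odds:
--             return False
--     return True
-- ===== SOURCE B (Python) =====
-- def f(x: str):
--     # forbidden patterns: every two-char string of same-parity digits
--     bad = [a + b for s in ('02468', '13579') for a in s for b in s]
--     return not any(p in x for p in bad)
-- ===== Notes on version B (the rewrite author's own statement) =====
-- stated objective: alternative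
-- what changed: B enumerates the 50 forbidden two-character same-parity digit strings once and answers by substring containment of any pattern in x, instead of A's indexed left-to-right scan testing parity membership of each adjacent character pair.
import Mathlib
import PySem

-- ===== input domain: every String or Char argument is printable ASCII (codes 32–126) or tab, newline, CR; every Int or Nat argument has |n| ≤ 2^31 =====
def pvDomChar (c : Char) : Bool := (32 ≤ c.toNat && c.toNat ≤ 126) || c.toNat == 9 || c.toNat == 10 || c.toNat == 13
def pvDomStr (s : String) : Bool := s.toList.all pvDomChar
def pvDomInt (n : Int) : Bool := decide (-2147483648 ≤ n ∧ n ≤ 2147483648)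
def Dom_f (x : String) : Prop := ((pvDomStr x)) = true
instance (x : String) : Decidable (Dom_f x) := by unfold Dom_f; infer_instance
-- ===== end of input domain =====

-- B answers by substring containment of the 50 forbidden same-parity digit pairs, instead of A's indexed adjacent-pair scan (alternative algorithm, same result).

-- ===== PORT A =====
def fEvens : List Char := ['0', '2', '4', '6', '8']
def fOdds : List Char := ['1', '3', '5', '7', '9']

-- the loop 'for i in range(len(x)-1)'; indices produced by pyRange are always in
-- range, so the default ' ' of pyGetD is never used ('x[i] in evens' on a single
-- char is exactly list membership of that char)
def fLoop (cs : List Char) : List Int → Bool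
  | [] => true
  | i :: rest =>
    if PySem.List.pyGetD cs i ' ' ∈ fEvens && PySem.List.pyGetD cs (i + 1) ' ' ∈ fEvens then false
    else if PySem.List.pyGetD cs i ' ' ∈ fOdds && PySem.List.pyGetD cs (i + 1) ' ' ∈ fOdds then false
    else fLoop cs rest

def f (x : String) : Bool :=
  fLoop x.toList (PySem.List.pyRange 0 ((x.toList.length : Int) - 1) 1)

-- ===== PORT B =====
-- 'bad = [a + b for s in ('02468', '13579') for a in s for b in s]'
def badPairs : List String :=
  [['0', '2', '4', '6', '8'], ['1', '3', '5', '7', '9']].flatMap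
    (fun s => s.flatMap (fun a => s.map (fun b => String.ofList [a, b])))

-- 'not any(p in x for p in bad)'
def f_alt (x : String) : Bool := !(badPairs.any (fun p => PySem.Str.isIn p x))

-- ===== PRECONDITION & SPEC =====
def Spec_f (x : String) (out : Bool) : Prop := out = f_alt x
instance (x : String) (out : Bool) : Decidable (Spec_f x out) := by unfold Spec_f; infer_instance

-- ===== CLAIM (what is proved, stated in full; the proofs are below) =====
def Claim_equal_f : Prop := ∀ (x : String), Dom_f x → Spec_f x (f x)

-- ===== LEMMAS AND PROOFS =====

-- the forbidden-pair test as one Bool, and A's scan as a structural recursion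
def badb (a b : Char) : Bool :=
  (a ∈ fEvens && b ∈ fEvens) || (a ∈ fOdds && b ∈ fOdds)

def refA : List Char → Bool
  | a :: b :: t => if badb a b then false else refA (b :: t)
  | _ => true

lemma if_if_or (p q : Bool) (k : Bool) :
    (if p then false else if q then false else k) = (if p || q then false else k) := by
  cases p <;> cases q <;> simp

-- A's index loop from position i equals the structural scan of the dropped suffix
lemma loop_eq (t : List Char) : ∀ (cs : List Char) (i : Nat), cs.drop i = t →
    fLoop cs (PySem.List.pyRange (i : Int) ((cs.length : Int) - 1) 1) = refA t := by
  induction t with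
  | nil =>
    intro cs i h
    have hlen : cs.length ≤ i := by
      have := congrArg List.length h; simp at this; omega
    rw [PySem.List.pyRange_one_eq_nil (by omega)]
    rfl
  | cons a t ih =>
    intro cs i h
    match t, ih with
    | [], _ =>
      have hlen : cs.length = i + 1 := by
        have := congrArg List.length h; simp at this; omega
      rw [PySem.List.pyRange_one_eq_nil (by omega)]
      rfl
    | b :: t', ih =>
      have hlen : cs.length = i + 2 + t'.length := by
        have := congrArg List.length h; simp at this; omega
      have hdrop1 : cs.drop (i + 1) = b :: t' := by
        rw [← List.tail_drop, h]; rfl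
      have hga : cs[i]? = some a := by
        rw [← List.head?_drop, h]; rfl
      have hgb : cs[i + 1]? = some b := by
        rw [← List.head?_drop, hdrop1]; rfl
      rw [PySem.List.pyRange_one_cons (by omega)]
      have e1 : PySem.List.pyGetD cs (i : Int) ' ' = a := by
        rw [PySem.List.pyGetD_natCast]; simp [List.getD, hga]
      have e2 : PySem.List.pyGetD cs ((i : Int) + 1) ' ' = b := by
        have : ((i : Int) + 1) = ((i + 1 : Nat) : Int) := by push_cast; ring
        rw [this, PySem.List.pyGetD_natCast]; simp [List.getD, hgb]
      show (if _ then false else if _ then false else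
        fLoop cs (PySem.List.pyRange ((i : Int) + 1) ((cs.length : Int) - 1) 1)) = _
      rw [e1, e2]
      have hc : ((i : Int) + 1) = ((i + 1 : Nat) : Int) := by push_cast; ring
      rw [hc, ih cs (i + 1) hdrop1, if_if_or]
      rfl

-- A's scan is false exactly when some forbidden adjacent pair occurs as an infix
lemma refA_false_iff (cs : List Char) :
    refA cs = false ↔ ∃ a b, badb a b = true ∧ [a, b] <:+: cs := by
  induction cs with
  | nil =>
    simp only [refA]
    constructor
    · intro h; simp at h
    · rintro ⟨a, b, _, h⟩
      have := h.length_le; simp at this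
  | cons a t ih =>
    cases t with
    | nil =>
      simp only [refA]
      constructor
      · intro h; simp at h
      · rintro ⟨p, q, _, h⟩
        have := h.length_le; simp at this
    | cons b t' =>
      show (if badb a b then false else refA (b :: t')) = false ↔ _
      by_cases h : badb a b = true
      · simp only [h, if_true]
        constructor
        · intro _; exact ⟨a, b, h, ⟨[], t', rfl⟩⟩
        · intro _; trivial
      · rw [if_neg h, ih]
        constructor
        · rintro ⟨p, q, hpq, hin⟩
          exact ⟨p, q, hpq, hin.trans (List.suffix_cons a (b :: t')).isInfix⟩
        · rintro ⟨p, q, hpq, hin⟩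
          rcases List.infix_cons_iff.mp hin with hpre | hin'
          · rcases hpre with ⟨r, hr⟩
            have ha : p = a := by injection hr
            have hb : q = b := by
              injection hr with _ hr'; injection hr'
            exact absurd (ha ▸ hb ▸ hpq) h
          · exact ⟨p, q, hpq, hin'⟩

-- B is false exactly when some forbidden pair occurs as an infix
lemma alt_false_iff (x : String) :
    f_alt x = false ↔ ∃ a b, badb a b = true ∧ [a, b] <:+: x.toList := by
  simp only [f_alt, badPairs, Bool.not_eq_false', List.any_eq_true, List.mem_flatMap,
    List.mem_map]
  constructor
  · rintro ⟨p, ⟨s, hs, a, ha, b, hb, rfl⟩, hin⟩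
    rw [PySem.Str.isIn_iff_infix] at hin
    refine ⟨a, b, ?_, by simpa using hin⟩
    simp only [List.mem_cons, List.not_mem_nil, or_false] at hs
    simp only [badb, fEvens, fOdds, Bool.or_eq_true, Bool.and_eq_true, decide_eq_true_eq]
    rcases hs with hs | hs
    · left; subst hs; exact ⟨by simpa using ha, by simpa using hb⟩
    · right; subst hs; exact ⟨by simpa using ha, by simpa using hb⟩
  · rintro ⟨a, b, hpq, hin⟩
    simp only [badb, fEvens, fOdds, Bool.or_eq_true, Bool.and_eq_true, decide_eq_true_eq] at hpq
    refine ⟨String.ofList [a, b], ?_, by rw [PySem.Str.isIn_iff_infix]; simpa using hin⟩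
    rcases hpq with ⟨ha, hb⟩ | ⟨ha, hb⟩
    · exact ⟨['0','2','4','6','8'], by simp, a, by simpa using ha, b, by simpa using hb, rfl⟩
    · exact ⟨['1','3','5','7','9'], by simp, a, by simpa using ha, b, by simpa using hb, rfl⟩

-- ===== VERDICT (by name: the statement is the Claim_ definition above) =====
theorem f_spec : Claim_equal_f := by
  intro x _
  show f x = f_alt x
  have hA : f x = refA x.toList := by
    unfold f
    exact loop_eq x.toList x.toList 0 (by simp)
  rw [hA]
  cases h1 : refA x.toList <;> cases h2 : f_alt x
  · rfl
  · exact absurd ((refA_false_iff _).mp h1) (fun hx => by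
      rw [(alt_false_iff x).mpr hx] at h2; exact Bool.false_ne_true h2)
  · exact absurd ((alt_false_iff x).mp h2) (fun hx => by
      rw [(refA_false_iff _).mpr hx] at h1; exact Bool.false_ne_true h1)
  · rfl
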